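-- pv_equiv track=rewrite | github.com/matushalak/advent-of-code | 2023/DAY1/day1.py | find_max_min_nested_list
-- ===== SOURCE A (Python) =====
-- def find_max_min_nested_list(nested_list):
--     max_val = max(nested_list[0])
--     min_val = min(nested_list[0])
--     min_ind, max_ind = 0,0
--     for i, l in enumerate(nested_list):
--         if max(nested_list[i]) > max_val:
--             max_val = max(nested_list[i])
--             max_ind = i
--
--         if min(nested_list[i]) < min_val:
--             min_val = min(nested_list[i])
--             min_ind = i
--
--     return min_ind, max_ind
-- ===== SOURCE B (Python) =====
-- def find_max_min_nested_list(nested_list):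
--     maxes = [max(l) for l in nested_list]
--     mins = [min(l) for l in nested_list]
--     return mins.index(min(mins)), maxes.index(max(maxes))
-- ===== Notes on version B (the rewrite author's own statement) =====
-- stated objective: simpler
-- what changed: Replaces the single fold that threads four state variables (running max/min values and their indices) with two table-building passes (per-sublist maxes and mins) followed by index-of-extremum lookups, which preserves the earliest-index tie rule.
import Mathlib
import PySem

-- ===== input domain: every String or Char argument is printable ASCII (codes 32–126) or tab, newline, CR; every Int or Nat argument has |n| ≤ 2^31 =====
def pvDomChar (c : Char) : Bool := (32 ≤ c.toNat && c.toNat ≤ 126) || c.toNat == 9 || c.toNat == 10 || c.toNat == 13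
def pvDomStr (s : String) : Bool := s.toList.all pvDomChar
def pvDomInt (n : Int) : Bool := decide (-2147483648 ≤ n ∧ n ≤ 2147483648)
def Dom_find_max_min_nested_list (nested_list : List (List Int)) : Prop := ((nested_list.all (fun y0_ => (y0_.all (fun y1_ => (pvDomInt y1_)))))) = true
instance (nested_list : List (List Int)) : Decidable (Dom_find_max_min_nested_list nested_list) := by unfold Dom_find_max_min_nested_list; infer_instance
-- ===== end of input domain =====

-- B replaces A's single four-variable fold by two per-sublist extremum tables plus index-of-extremum lookups (objective: simpler).
-- Pre_ excludes the inputs on which the Python A raises: the empty outer list (IndexError) and any empty sublist (ValueError from max([])).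


-- ===== PORT A =====
-- Python max(l) / min(l); the .getD 0 default is never reached under Pre_ (sublists are nonempty)
def pyMax (l : List Int) : Int := ((PySem.List.max? l (fun y => y)).getD 0)
def pyMin (l : List Int) : Int := ((PySem.List.min? l (fun y => y)).getD 0)

-- literal port of A: initial extrema from nested_list[0], then one fold over enumerate(nested_list)
def find_max_min_nested_list (nested_list : List (List Int)) : Int × Int :=
  let l0 := PySem.List.pyGetD nested_list 0 []
  let st := (PySem.List.enumerate nested_list 0).foldl
    (fun (s : Int × Int × Int × Int) (p : Int × List Int) =>
      let s1 : Int × Int × Int × Int :=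
        if pyMax p.2 > s.1 then (pyMax p.2, s.2.1, s.2.2.1, p.1) else s
      if pyMin p.2 < s1.2.1 then (s1.1, pyMin p.2, p.1, s1.2.2.2) else s1)
    (pyMax l0, pyMin l0, 0, 0)
  (st.2.2.1, st.2.2.2)

-- ===== PORT B =====
def find_max_min_nested_list_alt (nested_list : List (List Int)) : Int × Int :=
  let maxes := nested_list.map pyMax
  let mins := nested_list.map pyMin
  (((PySem.List.index? mins ((PySem.List.min? mins (fun y => y)).getD 0)).getD 0 : Nat),
   ((PySem.List.index? maxes ((PySem.List.max? maxes (fun y => y)).getD 0)).getD 0 : Nat))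

-- ===== PRECONDITION & SPEC =====
-- exactly where the Python A returns: nonempty outer list, every sublist nonempty
def Pre_find_max_min_nested_list (nested_list : List (List Int)) : Prop :=
  nested_list ≠ [] ∧ ∀ l ∈ nested_list, l ≠ []
instance (nested_list : List (List Int)) : Decidable (Pre_find_max_min_nested_list nested_list) := by unfold Pre_find_max_min_nested_list; infer_instance
def pvWitness_find_max_min_nested_list : List (List Int) := [[1, 2], [0]]

def Spec_find_max_min_nested_list (nested_list : List (List Int)) (out : Int × Int) : Prop := out = find_max_min_nested_list_alt nested_list
instance (nested_list : List (List Int)) (out : Int × Int) : Decidable (Spec_find_max_min_nested_list nested_list out) := by unfold Spec_find_max_min_nested_list; infer_instance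

-- ===== CLAIM (what is proved, stated in full; the proofs are below) =====
def Claim_equal_find_max_min_nested_list : Prop := ∀ (nested_list : List (List Int)), Dom_find_max_min_nested_list nested_list → Pre_find_max_min_nested_list nested_list → Spec_find_max_min_nested_list nested_list (find_max_min_nested_list nested_list)

-- ===== LEMMAS AND PROOFS =====

-- proof-only helpers: independent running-extremum scans with explicit index counter
def scanMin : List Int → Int × Int → Int → Int × Int
  | [], st, _ => st
  | x :: xs, st, i => scanMin xs (if x < st.1 then (x, i) else st) (i + 1)

def scanMax : List Int → Int × Int → Int → Int × Int
  | [], st, _ => st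
  | x :: xs, st, i => scanMax xs (if x > st.1 then (x, i) else st) (i + 1)

-- A's combined fold splits into the two independent scans
theorem foldA_eq (xs : List (List Int)) :
    ∀ (s : Int) (Mv mv mi Mi : Int),
    (PySem.List.enumerate xs s).foldl
      (fun (st : Int × Int × Int × Int) (p : Int × List Int) =>
        let s1 : Int × Int × Int × Int :=
          if pyMax p.2 > st.1 then (pyMax p.2, st.2.1, st.2.2.1, p.1) else st
        if pyMin p.2 < s1.2.1 then (s1.1, pyMin p.2, p.1, s1.2.2.2) else s1)
      (Mv, mv, mi, Mi)
    = ((scanMax (xs.map pyMax) (Mv, Mi) s).1,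
       (scanMin (xs.map pyMin) (mv, mi) s).1,
       (scanMin (xs.map pyMin) (mv, mi) s).2,
       (scanMax (xs.map pyMax) (Mv, Mi) s).2) := by
  induction xs with
  | nil => intro s Mv mv mi Mi; simp [PySem.List.enumerate_nil, scanMin, scanMax]
  | cons x t ih =>
    intro s Mv mv mi Mi
    rw [PySem.List.enumerate_cons]
    simp only [List.foldl_cons, List.map_cons, scanMin, scanMax]
    by_cases h1 : pyMax x > Mv <;> by_cases h2 : pyMin x < mv <;>
      simp [h1, h2, ih]

theorem scanMin_char (t : List Int) :
    ∀ (b idx i : Int),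
    scanMin t (b, idx) i
      = (t.foldl min b,
         if t.foldl min b < b then i + (List.idxOf (t.foldl min b) t : Int) else idx) := by
  induction t with
  | nil => intro b idx i; simp [scanMin]
  | cons x t ih =>
    intro b idx i
    have hle : t.foldl min x ≤ x := (PySem.List.foldl_min_le t x).1
    simp only [scanMin, List.foldl_cons]
    by_cases hx : x < b
    · have hmin : min b x = x := by omega
      rw [if_pos hx, hmin, ih]
      by_cases hlt : t.foldl min x < x
      · have hne : x ≠ t.foldl min x := by omega
        rw [if_pos hlt, if_pos (by omega), List.idxOf_cons_ne _ (by simpa using hne)]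
        push_cast; ring_nf
      · have heq : t.foldl min x = x := by omega
        rw [if_neg hlt, heq, if_pos hx, List.idxOf_cons_self]
        simp
    · have hmin : min b x = b := by omega
      rw [if_neg hx, hmin, ih]
      by_cases hlt : t.foldl min b < b
      · have hne : x ≠ t.foldl min b := by
          have := (PySem.List.foldl_min_le t b).1; omega
        rw [if_pos hlt, if_pos hlt, List.idxOf_cons_ne _ (by simpa using hne)]
        push_cast; ring_nf
      · simp [hlt]

theorem scanMax_char (t : List Int) :
    ∀ (b idx i : Int),
    scanMax t (b, idx) i
      = (t.foldl max b,
         if b < t.foldl max b then i + (List.idxOf (t.foldl max b) t : Int) else idx) := by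
  induction t with
  | nil => intro b idx i; simp [scanMax]
  | cons x t ih =>
    intro b idx i
    have hle : x ≤ t.foldl max x := (PySem.List.le_foldl_max t x).1
    simp only [scanMax, List.foldl_cons]
    by_cases hx : x > b
    · have hmax : max b x = x := by omega
      rw [if_pos hx, hmax, ih]
      by_cases hlt : x < t.foldl max x
      · have hne : x ≠ t.foldl max x := by omega
        rw [if_pos hlt, if_pos (by omega), List.idxOf_cons_ne _ (by simpa using hne)]
        push_cast; ring_nf
      · have heq : t.foldl max x = x := by omega
        rw [if_neg hlt, heq, if_pos hx, List.idxOf_cons_self]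
        simp
    · have hmax : max b x = b := by omega
      rw [if_neg hx, hmax, ih]
      by_cases hlt : b < t.foldl max b
      · have hne : x ≠ t.foldl max b := by
          have := (PySem.List.le_foldl_max t b).1; omega
        rw [if_pos hlt, if_pos hlt, List.idxOf_cons_ne _ (by simpa using hne)]
        push_cast; ring_nf
      · simp [hlt]


theorem idxOf?_of_mem {v : Int} {xs : List Int} (h : v ∈ xs) :
    List.idxOf? v xs = some (List.idxOf v xs) := by
  cases hk : List.idxOf? v xs with
  | none => exact absurd h (List.idxOf?_eq_none_iff.mp hk)
  | some k =>
    have := List.idxOf_eq_getD_idxOf? (a := v) (l := xs)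
    rw [hk] at this
    simp [this]

-- first index of the running minimum of a nonempty list, as B's index?/min? computes it
theorem min_side (m0 : Int) (ms' : List Int) :
    (if (m0 :: ms').foldl min m0 < m0
       then 0 + (List.idxOf ((m0 :: ms').foldl min m0) (m0 :: ms') : Int)
       else 0)
    = (((PySem.List.index? (m0 :: ms') ((PySem.List.min? (m0 :: ms') (fun y => y)).getD 0)).getD 0 : Nat) : Int) := by
  rw [PySem.List.min?_id_cons]
  have hmem : ms'.foldl min m0 = m0 ∨ ms'.foldl min m0 ∈ ms' := PySem.List.foldl_min_mem ms' m0
  have hfold : (m0 :: ms').foldl min m0 = ms'.foldl min m0 := by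
    simp [List.foldl_cons]
  rw [hfold]
  have hmem' : ms'.foldl min m0 ∈ m0 :: ms' := by
    rcases hmem with h | h
    · rw [h]; exact List.mem_cons_self
    · exact List.mem_cons_of_mem _ h
  simp only [Option.getD_some]
  rw [PySem.List.index?_eq_idxOf?, idxOf?_of_mem hmem']
  by_cases hlt : ms'.foldl min m0 < m0
  · rw [if_pos hlt]; simp
  · have heq : ms'.foldl min m0 = m0 := by
      have := (PySem.List.foldl_min_le ms' m0).1; omega
    rw [if_neg hlt, heq, List.idxOf_cons_self]
    simp

theorem max_side (m0 : Int) (ms' : List Int) :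
    (if m0 < (m0 :: ms').foldl max m0
       then 0 + (List.idxOf ((m0 :: ms').foldl max m0) (m0 :: ms') : Int)
       else 0)
    = (((PySem.List.index? (m0 :: ms') ((PySem.List.max? (m0 :: ms') (fun y => y)).getD 0)).getD 0 : Nat) : Int) := by
  rw [PySem.List.max?_id_cons]
  have hmem : ms'.foldl max m0 = m0 ∨ ms'.foldl max m0 ∈ ms' := PySem.List.foldl_max_mem ms' m0
  have hfold : (m0 :: ms').foldl max m0 = ms'.foldl max m0 := by
    simp [List.foldl_cons]
  rw [hfold]
  have hmem' : ms'.foldl max m0 ∈ m0 :: ms' := by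
    rcases hmem with h | h
    · rw [h]; exact List.mem_cons_self
    · exact List.mem_cons_of_mem _ h
  simp only [Option.getD_some]
  rw [PySem.List.index?_eq_idxOf?, idxOf?_of_mem hmem']
  by_cases hlt : m0 < ms'.foldl max m0
  · rw [if_pos hlt]; simp
  · have heq : ms'.foldl max m0 = m0 := by
      have := (PySem.List.le_foldl_max ms' m0).1; omega
    rw [if_neg hlt, heq, List.idxOf_cons_self]
    simp

-- ===== VERDICT (by name: the statement is the Claim_ definition above) =====
theorem find_max_min_nested_list_spec : Claim_equal_find_max_min_nested_list := by
  intro nested_list _hdom hpre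
  obtain ⟨hne, _⟩ := hpre
  unfold Spec_find_max_min_nested_list find_max_min_nested_list find_max_min_nested_list_alt
  obtain ⟨l0, rest, rfl⟩ : ∃ l0 rest, nested_list = l0 :: rest := by
    cases nested_list with
    | nil => exact absurd rfl hne
    | cons a t => exact ⟨a, t, rfl⟩
  have hget : PySem.List.pyGetD (l0 :: rest) 0 [] = l0 := by simp [pysem]
  simp only [hget, foldA_eq, scanMin_char, scanMax_char, List.map_cons]
  rw [← min_side (pyMin l0) (rest.map pyMin), ← max_side (pyMax l0) (rest.map pyMax)]
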